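-- pv_equiv track=rewrite | github.com/james5635/GeekForGeek-Data-Structure-and-Algorithm | sorting/medium/permute_two_arrays/solution.py | find_permutation_greedy
-- ===== SOURCE A (Python) =====
-- def find_permutation_greedy(a, b, k):
--     """
--     Alternative: Use greedy approach with two pointers.
--
--     Args:
--         a: First array of integers
--         b: Second array of integers
--         k: Target minimum sum
--
--     Returns:
--         bool: True if valid permutation exists
--     """
--     if len(a) != len(b):
--         return False
--
--     n = len(a)
--
--     # Sort both arrays
--     a_sorted = sorted(a)
--     b_sorted = sorted(b)
--
--     # Use two pointers - try to pair smallest of a with largest of b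
--     used = [False] * n
--
--     for i in range(n):
--         # Find the smallest element in b that makes sum >= k with a[i]
--         found = False
--         for j in range(n - 1, -1, -1):
--             if not used[j] and a_sorted[i] + b_sorted[j] >= k:
--                 used[j] = True
--                 found = True
--                 break
--
--         if not found:
--             return False
--
--     return True
-- ===== SOURCE B (Python) =====
-- def find_permutation_greedy(a, b, k):
--     if len(a) != len(b):
--         return False
--     return all(x + y >= k for x, y in zip(sorted(a), sorted(b, reverse=True)))
-- ===== Notes on version B (the rewrite author's own statement) =====
-- stated objective: simpler
-- what changed: Replaced A's used-array bookkeeping with a backwards inner scan by the classical one-line pairing check: sort a ascending, b descending, and test each pairwise sum once.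
import Mathlib
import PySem

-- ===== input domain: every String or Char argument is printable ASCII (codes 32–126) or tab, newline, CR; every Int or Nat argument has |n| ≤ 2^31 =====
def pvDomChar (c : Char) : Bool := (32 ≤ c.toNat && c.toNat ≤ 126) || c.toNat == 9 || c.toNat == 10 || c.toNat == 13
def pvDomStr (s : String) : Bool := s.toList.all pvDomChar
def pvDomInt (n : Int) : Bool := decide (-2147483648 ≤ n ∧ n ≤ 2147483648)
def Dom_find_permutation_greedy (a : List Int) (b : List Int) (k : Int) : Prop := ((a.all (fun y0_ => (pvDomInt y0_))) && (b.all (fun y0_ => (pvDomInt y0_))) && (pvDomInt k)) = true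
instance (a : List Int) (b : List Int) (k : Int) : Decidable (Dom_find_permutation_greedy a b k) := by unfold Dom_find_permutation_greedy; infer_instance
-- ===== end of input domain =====

-- B replaces A's used-array bookkeeping and backwards inner scan by the classical pairing check
-- (sort a ascending, b descending, test each pairwise sum once); return values are proved equal.

-- ===== PORT A =====
-- inner loop 'for j in range(n-1, -1, -1): if not used[j] and a_sorted[i] + b_sorted[j] >= k: … break';
-- fuel m means indices m-1, …, 0 remain to scan; all indexing is in range, so getD is exact here
def pvInnerA (x : Int) (bS : List Int) (used : List Bool) (k : Int) : Nat → Option Nat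
  | 0 => none
  | j + 1 =>
    if !used.getD j false && decide (x + bS.getD j 0 ≥ k) then some j
    else pvInnerA x bS used k j

-- outer loop 'for i in range(n)', fuel = n - i; the Option result of the inner scan is 'found'/the marked j
def pvOuterA (aS bS : List Int) (k : Int) (n : Nat) : Nat → Nat → List Bool → Bool
  | _, 0, _ => true
  | i, f + 1, used =>
    match pvInnerA (aS.getD i 0) bS used k n with
    | none => false
    | some j => pvOuterA aS bS k n (i + 1) f (used.set j true)

def find_permutation_greedy (a : List Int) (b : List Int) (k : Int) : Bool :=
  if a.length ≠ b.length then false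
  else
    let n := a.length
    let aS := PySem.List.sorted a (fun x => x) false
    let bS := PySem.List.sorted b (fun x => x) false
    pvOuterA aS bS k n 0 n (List.replicate n false)

-- ===== PORT B =====
def find_permutation_greedy_alt (a : List Int) (b : List Int) (k : Int) : Bool :=
  if a.length ≠ b.length then false
  else
    ((PySem.List.sorted a (fun x => x) false).zip (PySem.List.sorted b (fun x => x) true)).all
      (fun p => decide (p.1 + p.2 ≥ k))

-- ===== PRECONDITION & SPEC =====
def Spec_find_permutation_greedy (a : List Int) (b : List Int) (k : Int) (out : Bool) : Prop := out = find_permutation_greedy_alt a b k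
instance (a : List Int) (b : List Int) (k : Int) (out : Bool) : Decidable (Spec_find_permutation_greedy a b k out) := by unfold Spec_find_permutation_greedy; infer_instance

-- ===== CLAIM (what is proved, stated in full; the proofs are below) =====
def Claim_equal_find_permutation_greedy : Prop := ∀ (a : List Int) (b : List Int) (k : Int), Dom_find_permutation_greedy a b k → Spec_find_permutation_greedy a b k (find_permutation_greedy a b k)

-- ===== LEMMAS AND PROOFS =====

-- descending sort of integers is the reverse of the ascending sort
lemma sorted_rev_eq_reverse (b : List Int) :
    PySem.List.sorted b (fun x => x) true = (PySem.List.sorted b (fun x => x) false).reverse :=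
  List.Perm.eq_of_pairwise (le := fun a b : Int => b ≤ a)
    (fun _ _ _ _ h1 h2 => le_antisymm h2 h1)
    (PySem.List.sorted_pairwise_rev b (fun x => x))
    ((List.pairwise_reverse).mpr (PySem.List.sorted_pairwise b (fun x => x)))
    (((PySem.List.sorted_perm b (fun x => x) true).trans
        ((PySem.List.sorted_perm b (fun x => x) false).symm)).trans (List.reverse_perm _).symm)

-- the used list A maintains: after i successful iterations it is t falses followed by i trues
lemma shape_getD (t s j : Nat) :
    (List.replicate t false ++ List.replicate s true).getD j false = (decide (t ≤ j) && decide (j < t + s)) := by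
  rcases lt_or_ge j t with h | h
  · rw [List.getD_eq_getElem _ _ (by simp; omega)]
    simp [List.getElem_append_left, h]
  · rcases lt_or_ge j (t + s) with h2 | h2
    · rw [List.getD_eq_getElem _ _ (by simp; omega)]
      rw [List.getElem_append_right (by simp; omega)]
      simp [h, h2]
    · rw [List.getD_eq_default _ _ (by simp; omega)]
      simp; omega

lemma shape_set (t s : Nat) :
    (List.replicate (t + 1) false ++ List.replicate s true).set t true
      = List.replicate t false ++ List.replicate (s + 1) true := by
  induction t with
  | zero => simp [List.replicate_succ]
  | succ t ih =>
    simp only [List.replicate_succ, List.cons_append, List.set_cons_succ]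
    simpa [List.replicate_succ] using congrArg (List.cons false) ih

-- the inner scan skips the used indices at the top
lemma pvInnerA_skip (x : Int) (bS : List Int) (used : List Bool) (k : Int) (t : Nat) :
    ∀ m, t ≤ m → (∀ j, t ≤ j → j < m → used.getD j false = true) →
      pvInnerA x bS used k m = pvInnerA x bS used k t := by
  intro m
  induction m with
  | zero => intro h _; obtain rfl : t = 0 := by omega
            rfl
  | succ m ih =>
    intro h hused
    rcases Nat.eq_or_lt_of_le h with rfl | hlt
    · rfl
    · have hm : used.getD m false = true := hused m (by omega) (by omega)
      simp only [pvInnerA, hm, Bool.not_true, Bool.false_and, Bool.false_eq_true, if_false]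
      exact ih (by omega) (fun j h1 h2 => hused j h1 (by omega))

-- the inner scan fails when no remaining index has a large enough sum
lemma pvInnerA_none (x : Int) (bS : List Int) (used : List Bool) (k : Int) :
    ∀ m, (∀ j, j < m → ¬(x + bS.getD j 0 ≥ k)) → pvInnerA x bS used k m = none := by
  intro m
  induction m with
  | zero => intro _; rfl
  | succ m ih =>
    intro h
    have hc : decide (x + bS.getD m 0 ≥ k) = false := by
      simp only [decide_eq_false_iff_not]; exact h m (by omega)
    simp only [pvInnerA, hc, Bool.and_false, Bool.false_eq_true, if_false]
    exact ih (fun j hj => h j (by omega))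

-- characterisation of A's outer loop on the invariant used-list shape
lemma pvOuterA_char (aS bS : List Int) (k : Int) (n : Nat)
    (hb : bS.length = n) (hbs : bS.Pairwise (· ≤ ·)) :
    ∀ f i, i + f = n →
      (pvOuterA aS bS k n i f (List.replicate (n - i) false ++ List.replicate i true) = true
        ↔ ∀ r, i ≤ r → r < n → aS.getD r 0 + bS.getD (n - 1 - r) 0 ≥ k) := by
  intro f
  induction f with
  | zero =>
    intro i hi
    simp only [pvOuterA, true_iff]
    omega
  | succ f ih =>
    intro i hi
    have hin : i < n := by omega
    obtain ⟨t, htt⟩ : ∃ t, n - i = t + 1 := ⟨n - i - 1, by omega⟩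
    have htn : n - 1 - i = t := by omega
    rw [htt]
    have hskip : pvInnerA (aS.getD i 0) bS (List.replicate (t + 1) false ++ List.replicate i true) k n
        = pvInnerA (aS.getD i 0) bS (List.replicate (t + 1) false ++ List.replicate i true) k (t + 1) := by
      apply pvInnerA_skip _ _ _ _ _ _ (by omega)
      intro j h1 h2
      rw [shape_getD]; simp; omega
    have hu : (List.replicate (t + 1) false ++ List.replicate i true).getD t false = false := by
      rw [shape_getD]; simp
    by_cases hcond : aS.getD i 0 + bS.getD t 0 ≥ k
    · have hfound : pvInnerA (aS.getD i 0) bS (List.replicate (t + 1) false ++ List.replicate i true) k (t + 1)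
          = some t := by
        simp only [pvInnerA, hu, Bool.not_false, Bool.true_and]
        rw [if_pos (by simpa using hcond)]
      have hset : (List.replicate (t + 1) false ++ List.replicate i true).set t true
          = List.replicate (n - (i + 1)) false ++ List.replicate (i + 1) true := by
        rw [shape_set, show n - (i + 1) = t from by omega]
      simp only [pvOuterA, hskip, hfound, hset]
      rw [ih (i + 1) (by omega)]
      constructor
      · intro h r h1 h2
        rcases Nat.eq_or_lt_of_le h1 with rfl | hlt
        · rw [htn]; exact hcond
        · exact h r hlt h2
      · intro h r h1 h2
        exact h r (by omega) h2
    · have hnone : pvInnerA (aS.getD i 0) bS (List.replicate (t + 1) false ++ List.replicate i true) k (t + 1)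
          = none := by
        apply pvInnerA_none
        intro j hj hge
        apply hcond
        have hmono : bS.getD j 0 ≤ bS.getD t 0 := by
          have h1 : j < bS.length := by omega
          have h2 : t < bS.length := by omega
          rw [List.getD_eq_getElem bS 0 h1, List.getD_eq_getElem bS 0 h2]
          rcases Nat.eq_or_lt_of_le (show j ≤ t by omega) with rfl | hlt
          · exact le_refl _
          · exact List.pairwise_iff_getElem.mp hbs j t h1 h2 hlt
        omega
      simp only [pvOuterA, hskip, hnone]
      constructor
      · intro h; cases h
      · intro h
        have := h i (le_refl _) hin
        rw [htn] at this
        exact absurd this hcond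

-- characterisation of B
lemma alt_char (a b : List Int) (k : Int) (hlen : a.length = b.length) :
    (find_permutation_greedy_alt a b k = true
      ↔ ∀ r, r < a.length →
          (PySem.List.sorted a (fun x => x) false).getD r 0
            + (PySem.List.sorted b (fun x => x) false).getD (a.length - 1 - r) 0 ≥ k) := by
  have haS : (PySem.List.sorted a (fun x => x) false).length = a.length := PySem.List.length_sorted ..
  have hbS : (PySem.List.sorted b (fun x => x) false).length = a.length := by
    rw [PySem.List.length_sorted]; omega
  unfold find_permutation_greedy_alt
  rw [if_neg (by omega), sorted_rev_eq_reverse]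
  rw [List.all_eq_true]
  constructor
  · intro h r hr
    have hr1 : r < (PySem.List.sorted a (fun x => x) false).length := by omega
    have hr2 : r < (PySem.List.sorted b (fun x => x) false).reverse.length := by simp; omega
    have hmem : ((PySem.List.sorted a (fun x => x) false)[r]'hr1,
        ((PySem.List.sorted b (fun x => x) false).reverse)[r]'hr2)
        ∈ (PySem.List.sorted a (fun x => x) false).zip (PySem.List.sorted b (fun x => x) false).reverse := by
      rw [← List.getElem_zip (h := by simp [List.length_zip]; omega)]
      exact List.getElem_mem _
    have := h _ hmem
    simp only [decide_eq_true_eq] at this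
    rw [List.getElem_reverse] at this
    rw [List.getD_eq_getElem _ 0 hr1, List.getD_eq_getElem _ 0 (show a.length - 1 - r < _ by omega)]
    convert this using 3
    omega
  · intro h p hp
    rw [List.mem_iff_getElem] at hp
    obtain ⟨r, hr, hpe⟩ := hp
    have hr1 : r < (PySem.List.sorted a (fun x => x) false).length := by
      simp [List.length_zip] at hr; omega
    have hr2 : r < (PySem.List.sorted b (fun x => x) false).length := by
      simp [List.length_zip] at hr; omega
    rw [List.getElem_zip] at hpe
    subst hpe
    simp only [decide_eq_true_eq]
    rw [List.getElem_reverse]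
    have := h r (by omega)
    rw [List.getD_eq_getElem _ 0 hr1,
        List.getD_eq_getElem _ 0 (show a.length - 1 - r < (PySem.List.sorted b (fun x => x) false).length by omega)] at this
    convert this using 3
    omega

-- ===== VERDICT (by name: the statement is the Claim_ definition above) =====
theorem find_permutation_greedy_spec : Claim_equal_find_permutation_greedy := by
  intro a b k _
  unfold Spec_find_permutation_greedy
  by_cases hlen : a.length = b.length
  · have hA : find_permutation_greedy a b k
        = pvOuterA (PySem.List.sorted a (fun x => x) false) (PySem.List.sorted b (fun x => x) false)
            k a.length 0 a.length (List.replicate a.length false) := by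
      unfold find_permutation_greedy
      rw [if_neg (by omega)]
    have hchar := pvOuterA_char (PySem.List.sorted a (fun x => x) false)
      (PySem.List.sorted b (fun x => x) false) k a.length
      (by rw [PySem.List.length_sorted]; omega)
      (PySem.List.sorted_pairwise b (fun x => x)) a.length 0 (by omega)
    simp only [Nat.sub_zero, List.replicate_zero, List.append_nil] at hchar
    rw [Bool.eq_iff_iff, hA, hchar, alt_char a b k hlen]
    constructor
    · intro h r hr; exact h r (by omega) hr
    · intro h r _ hr; exact h r hr
  · unfold find_permutation_greedy find_permutation_greedy_alt
    rw [if_pos (by omega), if_pos (by omega)]
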